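-- pv_equiv track=rewrite | github.com/brandonchu98/game | Assignment 2/stonehenge.py | down_left_ley_lines
-- ===== SOURCE A (Python) =====
-- def down_left_ley_lines(board: list) -> list:
--     """
--     Return a list of the down left ley-lines given a board
--     """
--     part_board = board[:-1]
--     end_board = board[-1]
--     down_left = []
--     for i in range(len(part_board[-1])):
--         row = [part_board[index][i]
--                for index in range(len(part_board))
--                if i <= len(part_board[index]) - 1]
--         down_left.append(row)
--     for i in range(1, len(down_left)):
--         down_left[i].append(end_board[i - 1])
--     return down_left
-- ===== SOURCE B (Python) =====
-- def down_left_ley_lines(board: list) -> list: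
--     """
--     Return a list of the down left ley-lines given a board
--     """
--     part_board = board[:-1]
--     end_board = board[-1]
--     width = len(part_board[-1])
--     down_left = [[] for _ in range(width)]
--     for row in part_board:
--         for i, val in enumerate(row):
--             if i < width:
--                 down_left[i].append(val)
--     return [col + [end_board[i - 1]] if i else col
--             for i, col in enumerate(down_left)]
-- ===== Notes on version B (the rewrite author's own statement) =====
-- stated objective: alternative
-- what changed: B replaces A's column-by-column gather (a filtered range comprehension per ley-line) by a single input-driven scatter pass: it preallocates the columns and transposes row by row, then attaches the last-row cells in one enumerate comprehension instead of in-place index assignment.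
import Mathlib
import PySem

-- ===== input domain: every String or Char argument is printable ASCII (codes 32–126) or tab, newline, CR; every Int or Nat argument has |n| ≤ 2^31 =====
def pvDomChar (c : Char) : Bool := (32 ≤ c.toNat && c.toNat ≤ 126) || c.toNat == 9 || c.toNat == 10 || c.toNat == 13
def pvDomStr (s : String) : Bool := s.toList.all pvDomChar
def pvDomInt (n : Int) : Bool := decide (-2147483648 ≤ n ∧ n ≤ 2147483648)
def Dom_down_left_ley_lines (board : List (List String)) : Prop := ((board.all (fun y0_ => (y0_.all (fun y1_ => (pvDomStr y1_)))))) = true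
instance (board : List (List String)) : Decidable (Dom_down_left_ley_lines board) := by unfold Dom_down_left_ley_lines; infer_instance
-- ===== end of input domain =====

-- B scatters the board row by row into preallocated columns (a transpose pass) instead of
-- gathering each column with a filtered range comprehension; the last-row cells are attached
-- in one enumerate comprehension instead of an in-place index-assignment loop.

-- ===== PORT A =====
def down_left_ley_lines (board : List (List String)) : List (List String) :=
  let part_board := PySem.List.slice board none (some (-1))
  let end_board := PySem.List.pyGetD board (-1) []
  let down_left : List (List String) :=
    (PySem.List.pyRange 0 (PySem.List.pyGetD part_board (-1) []).length 1).foldl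
      (fun down_left i =>
        let row := ((PySem.List.pyRange 0 part_board.length 1).filter
            (fun index => decide (i ≤ ((PySem.List.pyGetD part_board index []).length : Int) - 1))).map
            (fun index => PySem.List.pyGetD (PySem.List.pyGetD part_board index []) i "")
        down_left ++ [row]) []
  (PySem.List.pyRange 1 down_left.length 1).foldl
    (fun dl i => PySem.List.pySetD dl i
      (PySem.List.pyGetD dl i [] ++ [PySem.List.pyGetD end_board (i - 1) ""])) down_left

-- ===== PORT B =====
def down_left_ley_lines_alt (board : List (List String)) : List (List String) :=
  let part_board := PySem.List.slice board none (some (-1))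
  let end_board := PySem.List.pyGetD board (-1) []
  let width := (PySem.List.pyGetD part_board (-1) []).length
  let down_left : List (List String) :=
    part_board.foldl
      (fun dl row =>
        (PySem.List.enumerate row 0).foldl
          (fun dl p =>
            if p.1 < (width : Int) then
              PySem.List.pySetD dl p.1 (PySem.List.pyGetD dl p.1 [] ++ [p.2])
            else dl)
          dl)
      (List.replicate width [])
  (PySem.List.enumerate down_left 0).map
    (fun p => if p.1 ≠ 0 then p.2 ++ [PySem.List.pyGetD end_board (p.1 - 1) ""] else p.2)

-- ===== PRECONDITION & SPEC =====
-- Pre_ excludes exactly the inputs where A raises IndexError: boards with fewer than two rows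
-- (board[-1] / part_board[-1]) and boards whose last row is too short for the second loop.
def Pre_down_left_ley_lines (board : List (List String)) : Prop :=
  2 ≤ board.length ∧
    (board.getD (board.length - 2) []).length ≤ (board.getD (board.length - 1) []).length + 1
instance (board : List (List String)) : Decidable (Pre_down_left_ley_lines board) := by
  unfold Pre_down_left_ley_lines; infer_instance
def pvWitness_down_left_ley_lines : List (List String) := [["a", "b"], ["c"], ["d"]]
def Spec_down_left_ley_lines (board : List (List String)) (out : List (List String)) : Prop := out = down_left_ley_lines_alt board
instance (board : List (List String)) (out : List (List String)) : Decidable (Spec_down_left_ley_lines board out) := by unfold Spec_down_left_ley_lines; infer_instance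

-- ===== CLAIM (what is proved, stated in full; the proofs are below) =====
def Claim_equal_down_left_ley_lines : Prop := ∀ (board : List (List String)), Dom_down_left_ley_lines board → Pre_down_left_ley_lines board → Spec_down_left_ley_lines board (down_left_ley_lines board)

-- ===== LEMMAS AND PROOFS =====

/-- The down-left column `k` of a (possibly ragged) board part. -/
def pvCol (pb : List (List String)) (k : Nat) : List String :=
  pb.filterMap (fun r => r[k]?)

theorem pv_gather_nat (k : Nat) : ∀ (pb : List (List String)),
    ((List.range pb.length).filter (fun idx => decide (k < (pb.getD idx []).length))).map
      (fun idx => (pb.getD idx []).getD k "") = pvCol pb k := by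
  intro pb
  induction pb with
  | nil => simp [pvCol]
  | cons r pb' ih =>
    rw [List.length_cons, List.range_succ_eq_map, List.filter_cons]
    simp only [List.getD_cons_zero, List.filter_map, Function.comp_def,
      List.getD_cons_succ]
    by_cases hk : k < r.length
    · rw [if_pos (by simpa using hk)]
      rw [List.map_cons, List.map_map]
      simp only [Function.comp_def, List.getD_cons_succ, List.getD_cons_zero]
      rw [ih]
      simp [pvCol, List.getElem?_eq_getElem hk]
    · rw [if_neg (by simpa using hk)]
      rw [List.map_map]
      simp only [Function.comp_def, List.getD_cons_succ]
      rw [ih]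
      simp [pvCol, List.getElem?_eq_none (by omega : r.length ≤ k)]

/-- A's gather comprehension for one column equals `pvCol`. -/
theorem pv_gather_eq (pb : List (List String)) (k : Nat) :
    ((PySem.List.pyRange 0 pb.length 1).filter
        (fun index => decide ((k : Int) ≤ ((PySem.List.pyGetD pb index []).length : Int) - 1))).map
      (fun index => PySem.List.pyGetD (PySem.List.pyGetD pb index []) (k : Int) "")
    = pvCol pb k := by
  rw [PySem.List.pyRange_zero_nat, List.filter_map, List.map_map]
  simp only [Function.comp_def, PySem.List.pyGetD_natCast, Int.le_sub_one_iff, Nat.cast_lt]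
  exact pv_gather_nat k pb

/-- `mapIdx` over `replicate` is a `map` over `range`. -/
theorem pv_mapIdx_replicate {α β : Type} (n : Nat) (a : α) (f : Nat → α → β) :
    (List.replicate n a).mapIdx f = (List.range n).map (fun j => f j a) := by
  apply List.ext_getElem
  · simp
  · intro j h1 h2
    simp

/-- One row of B's scatter pass, with the enumerate start generalized. -/
theorem pv_scatter_row (w : Nat) (row : List String) :
    ∀ (s : Int), 0 ≤ s → ∀ (dl : List (List String)), dl.length = w →
    (PySem.List.enumerate row s).foldl
        (fun dl p =>
          if p.1 < (w : Int) then
            PySem.List.pySetD dl p.1 (PySem.List.pyGetD dl p.1 [] ++ [p.2])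
          else dl) dl
      = dl.mapIdx (fun j c => if s ≤ (j : Int) then c ++ (row[j - s.toNat]?).toList else c) := by
  induction row with
  | nil =>
    intro s _ dl _
    rw [PySem.List.enumerate_nil, List.foldl_nil]
    apply List.ext_getElem
    · simp
    · intro j h1 h2
      simp only [List.getElem_mapIdx]
      split <;> simp
  | cons v row' ih =>
    intro s hs dl hw
    rw [PySem.List.enumerate_cons, List.foldl_cons]
    have hstep : (if s < (w : Int) then
        PySem.List.pySetD dl s (PySem.List.pyGetD dl s [] ++ [v]) else dl)
        = dl.set s.toNat (dl.getD s.toNat [] ++ [v]) := by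
      by_cases h : s < (w : Int)
      · rw [if_pos h, PySem.List.pySetD_of_nonneg dl _ hs, PySem.List.pyGetD_of_nonneg dl [] hs]
      · rw [if_neg h]
        exact (List.set_eq_of_length_le (by omega)).symm
    rw [hstep, ih (s + 1) (by omega) _ (by simpa using hw)]
    apply List.ext_getElem
    · simp
    · intro j h1 h2
      have hjlen : j < dl.length := by simpa using h2
      simp only [List.getElem_mapIdx, List.getElem_set]
      by_cases hj : s.toNat = j
      · subst hj
        rw [if_neg (by omega : ¬ s + 1 ≤ ((s.toNat : Nat) : Int)), if_pos rfl,
          if_pos (by omega : s ≤ ((s.toNat : Nat) : Int))]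
        have h0 : s.toNat - s.toNat = 0 := by omega
        rw [h0]
        simp only [List.getElem?_cons_zero, Option.toList_some]
        rw [List.getD_eq_getElem dl [] (by omega)]
      · by_cases hij : s + 1 ≤ (j : Int)
        · rw [if_pos hij, if_neg hj, if_pos (by omega : s ≤ (j : Int))]
          have h2' : j - s.toNat = (j - (s + 1).toNat) + 1 := by omega
          rw [h2', List.getElem?_cons_succ]
        · rw [if_neg hij, if_neg hj, if_neg (by omega : ¬ s ≤ (j : Int))]

/-- B's whole scatter pass appends `pvCol` to every column. -/
theorem pv_scatter_all (w : Nat) (pb : List (List String)) :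
    ∀ (dl : List (List String)), dl.length = w →
    pb.foldl
        (fun dl row =>
          (PySem.List.enumerate row 0).foldl
            (fun dl p =>
              if p.1 < (w : Int) then
                PySem.List.pySetD dl p.1 (PySem.List.pyGetD dl p.1 [] ++ [p.2])
              else dl) dl) dl
      = dl.mapIdx (fun j c => c ++ pvCol pb j) := by
  induction pb with
  | nil =>
    intro dl _
    rw [List.foldl_nil]
    apply List.ext_getElem
    · simp
    · intro j h1 h2
      simp [pvCol]
  | cons r pb' ih =>
    intro dl hw
    rw [List.foldl_cons, pv_scatter_row w r 0 (by omega) dl hw, ih _ (by simpa using hw)]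
    rw [List.mapIdx_mapIdx]
    apply List.ext_getElem
    · simp
    · intro j h1 h2
      simp only [List.getElem_mapIdx, Function.comp_apply]
      rw [if_pos (by omega)]
      simp only [Int.toNat_zero, Nat.sub_zero, List.append_assoc]
      congr 1
      simp only [pvCol, List.filterMap_cons]
      cases hr : r[j]? with
      | none => simp
      | some b => simp

/-- A's in-place second loop, bounds generalized for the induction. -/
theorem pv_final_fold (eb : List String) :
    ∀ (n : Nat) (a : Int) (m : Nat), 0 ≤ a → ((m : Int) - a).toNat ≤ n →
    ∀ (dl : List (List String)),
    (PySem.List.pyRange a (m : Int) 1).foldl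
        (fun dl i => PySem.List.pySetD dl i
          (PySem.List.pyGetD dl i [] ++ [PySem.List.pyGetD eb (i - 1) ""])) dl
      = dl.mapIdx (fun j c =>
          if a ≤ (j : Int) ∧ j < m then c ++ [PySem.List.pyGetD eb ((j : Int) - 1) ""] else c) := by
  intro n
  induction n with
  | zero =>
    intro a m ha hm dl
    rw [PySem.List.pyRange_one_eq_nil (by omega), List.foldl_nil]
    apply List.ext_getElem
    · simp
    · intro j h1 h2
      simp only [List.getElem_mapIdx]
      rw [if_neg (by omega)]
  | succ n ih =>
    intro a m ha hm dl
    by_cases ham : a < (m : Int)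
    · rw [PySem.List.pyRange_one_cons ham, List.foldl_cons]
      have hstep : PySem.List.pySetD dl a
            (PySem.List.pyGetD dl a [] ++ [PySem.List.pyGetD eb (a - 1) ""])
          = dl.set a.toNat (dl.getD a.toNat [] ++ [PySem.List.pyGetD eb (a - 1) ""]) := by
        rw [PySem.List.pySetD_of_nonneg dl _ ha, PySem.List.pyGetD_of_nonneg dl [] ha]
      rw [hstep, ih (a + 1) m (by omega) (by omega) _]
      apply List.ext_getElem
      · simp
      · intro j h1 h2
        have hjlen : j < dl.length := by simpa using h2
        simp only [List.getElem_mapIdx, List.getElem_set]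
        by_cases hj : a.toNat = j
        · subst hj
          rw [if_neg (by omega : ¬ (a + 1 ≤ ((a.toNat : Nat) : Int) ∧ a.toNat < m)), if_pos rfl,
            if_pos (show a ≤ ((a.toNat : Nat) : Int) ∧ a.toNat < m by omega)]
          rw [List.getD_eq_getElem dl [] (by omega)]
          congr 3
          omega
        · by_cases hij : a + 1 ≤ (j : Int) ∧ j < m
          · rw [if_pos hij, if_neg hj, if_pos (by omega)]
          · rw [if_neg hij, if_neg hj, if_neg (by omega)]
    · rw [PySem.List.pyRange_one_eq_nil (by omega), List.foldl_nil]
      apply List.ext_getElem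
      · simp
      · intro j h1 h2
        simp only [List.getElem_mapIdx]
        rw [if_neg (by omega)]

/-- Enumerate-then-map is `mapIdx`. -/
theorem pv_enumerate_map {α β : Type} (f : Int × α → β) :
    ∀ (dl : List α) (s : Int),
    (PySem.List.enumerate dl s).map f
      = dl.mapIdx (fun j c => f (s + (j : Int), c)) := by
  intro dl
  induction dl with
  | nil => intro s; simp [PySem.List.enumerate_nil]
  | cons c dl' ih =>
    intro s
    rw [PySem.List.enumerate_cons, List.map_cons, List.mapIdx_cons, ih (s + 1)]
    congr 1
    · congr 1
      simp
    · apply List.ext_getElem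
      · simp
      · intro j h1 h2
        simp only [List.getElem_mapIdx]
        congr 2
        push_cast
        ring

/-- A's second loop and B's enumerate comprehension agree for any list. -/
theorem pv_final_eq (eb : List String) (dl : List (List String)) :
    (PySem.List.pyRange 1 dl.length 1).foldl
        (fun dl i => PySem.List.pySetD dl i
          (PySem.List.pyGetD dl i [] ++ [PySem.List.pyGetD eb (i - 1) ""])) dl
      = (PySem.List.enumerate dl 0).map
          (fun p => if p.1 ≠ 0 then p.2 ++ [PySem.List.pyGetD eb (p.1 - 1) ""] else p.2) := by
  rw [pv_final_fold eb dl.length 1 dl.length (by omega) (by omega) dl, pv_enumerate_map]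
  apply List.ext_getElem
  · simp
  · intro j h1 h2
    have hjlen : j < dl.length := by simpa using h1
    simp only [List.getElem_mapIdx, zero_add, ne_eq]
    split_ifs <;> first | rfl | (exfalso; omega)

/-- A's first loop (gather, already in map form) equals the column map B produces. -/
theorem pv_cols_eq (pb : List (List String)) (w : Nat) :
    (PySem.List.pyRange 0 (w : Int) 1).map
      (fun i => ((PySem.List.pyRange 0 pb.length 1).filter
          (fun index => decide (i ≤ ((PySem.List.pyGetD pb index []).length : Int) - 1))).map
        (fun index => PySem.List.pyGetD (PySem.List.pyGetD pb index []) i ""))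
    = (List.range w).map (fun j => [] ++ pvCol pb j) := by
  rw [PySem.List.pyRange_zero_nat w, List.map_map]
  apply List.map_congr_left
  intro k _
  simp only [Function.comp_apply, List.nil_append]
  exact pv_gather_eq pb k

theorem down_left_ley_lines_spec : Claim_equal_down_left_ley_lines := by
  intro board _ _
  unfold Spec_down_left_ley_lines
  simp only [down_left_ley_lines, down_left_ley_lines_alt]
  rw [PySem.List.foldl_append_singleton_eq_map, List.nil_append, pv_cols_eq,
    pv_scatter_all _ _ _ (List.length_replicate), pv_mapIdx_replicate]
  exact pv_final_eq _ _
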